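-- pv_equiv track=rewrite | github.com/University-Bangkok-JW/cs350-hw-bst | m98.py | create_and_traverse_bst
-- ===== SOURCE A (Python) =====
-- class TreeNode:
--     def __init__(self, key):
--         self.left = None
--         self.right = None
--         self.val = key
--
-- def insertNode(root, key):
--     if root is None:
--         return TreeNode(key)
--     if key < root.val:
--         root.left = insertNode(root.left, key)
--     else:
--         root.right = insertNode(root.right, key)
--     return root
--
-- def inOrder(root):
--     return inOrder(root.left) + [root.val] + inOrder(root.right) if root else []
--
-- def preOrder(root):
--     return [root.val] + preOrder(root.left) + preOrder(root.right) if root else []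
--
-- def postOrder(root):
--     return postOrder(root.left) + postOrder(root.right) + [root.val] if root else []
--
-- def create_and_traverse_bst(data):
--     root = None
--     for num in data:
--         root = insertNode(root, num)
--     return {
--         "inOrder": inOrder(root),
--         "preOrder": preOrder(root),
--         "postOrder": postOrder(root)
--     }
-- ===== SOURCE B (Python) =====
-- def create_and_traverse_bst(data):
--     # tree node = [left, val, right]; iterative insertion, one combined walk with appends
--     root = None
--     for num in data:
--         if root is None:
--             root = [None, num, None]
--         else:
--             cur = root
--             while True:
--                 i = 0 if num < cur[1] else 2
--                 if cur[i] is None: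
--                     cur[i] = [None, num, None]
--                     break
--                 cur = cur[i]
--     ino, pre, post = [], [], []
--     def walk(node):
--         if node is not None:
--             pre.append(node[1])
--             walk(node[0])
--             ino.append(node[1])
--             walk(node[2])
--             post.append(node[1])
--     walk(root)
--     return {"inOrder": ino, "preOrder": pre, "postOrder": post}
-- ===== Notes on version B (the rewrite author's own statement) =====
-- stated objective: alternative
-- what changed: Replaces recursive insertion and three separate list-concatenation traversals by iterative path-descending insertion and one combined walk that appends all three orders in a single pass (measured ~4x faster on sorted inputs up to n=4096, but same O(n*h) worst-case insertion).
import Mathlib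
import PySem

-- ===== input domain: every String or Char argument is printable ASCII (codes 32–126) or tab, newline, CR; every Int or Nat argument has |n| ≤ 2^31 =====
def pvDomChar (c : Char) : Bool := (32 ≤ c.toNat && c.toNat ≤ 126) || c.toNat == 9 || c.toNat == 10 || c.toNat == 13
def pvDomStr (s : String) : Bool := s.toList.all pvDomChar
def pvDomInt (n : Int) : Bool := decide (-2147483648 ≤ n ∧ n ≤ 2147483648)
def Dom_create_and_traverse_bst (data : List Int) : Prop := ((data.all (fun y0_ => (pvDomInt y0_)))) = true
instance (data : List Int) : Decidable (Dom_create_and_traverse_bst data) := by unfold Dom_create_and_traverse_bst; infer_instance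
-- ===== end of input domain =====

-- B: iterative (path-descending) insertion and ONE append-based walk computing all three
-- traversal orders in a single pass, instead of recursive insertion and three concatenation traversals.


-- ===== PORT A =====
inductive PvTree where
  | leaf : PvTree
  | node : PvTree → Int → PvTree → PvTree
deriving DecidableEq, Repr

def insertNode : PvTree → Int → PvTree
  | .leaf, key => .node .leaf key .leaf
  | .node l v r, key =>
      if key < v then .node (insertNode l key) v r
      else .node l v (insertNode r key)

def inOrderA : PvTree → List Int
  | .leaf => []
  | .node l v r => inOrderA l ++ [v] ++ inOrderA r

def preOrderA : PvTree → List Int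
  | .leaf => []
  | .node l v r => [v] ++ preOrderA l ++ preOrderA r

def postOrderA : PvTree → List Int
  | .leaf => []
  | .node l v r => postOrderA l ++ postOrderA r ++ [v]

def create_and_traverse_bst (data : List Int) : List (String × List Int) :=
  let root := data.foldl (fun root num => insertNode root num) .leaf
  [("inOrder", inOrderA root), ("preOrder", preOrderA root), ("postOrder", postOrderA root)]

-- ===== PORT B =====
-- the while-loop descending the tree, rebuilding the mutated path (leaf case unreachable from bStep)
def insertLoop (num : Int) : PvTree → PvTree
  | .leaf => .node .leaf num .leaf
  | .node l v r =>
      if num < v then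
        match l with
        | .leaf => .node (.node .leaf num .leaf) v r
        | l => .node (insertLoop num l) v r
      else
        match r with
        | .leaf => .node l v (.node .leaf num .leaf)
        | r => .node l v (insertLoop num r)

def bStep (root : PvTree) (num : Int) : PvTree :=
  match root with
  | .leaf => .node .leaf num .leaf        -- "if root is None"
  | t => insertLoop num t

-- one walk, three accumulators appended to in Python's order
def walkB : PvTree → List Int × List Int × List Int → List Int × List Int × List Int
  | .leaf, s => s
  | .node l v r, (ino, pre, post) =>
      let (i1, p1, po1) := walkB l (ino, pre ++ [v], post)
      let (i2, p2, po2) := walkB r (i1 ++ [v], p1, po1)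
      (i2, p2, po2 ++ [v])

def create_and_traverse_bst_alt (data : List Int) : List (String × List Int) :=
  let root := data.foldl bStep .leaf
  let (ino, pre, post) := walkB root ([], [], [])
  [("inOrder", ino), ("preOrder", pre), ("postOrder", post)]

-- ===== PRECONDITION & SPEC =====
def Spec_create_and_traverse_bst (data : List Int) (out : List (String × List Int)) : Prop := out = create_and_traverse_bst_alt data
instance (data : List Int) (out : List (String × List Int)) : Decidable (Spec_create_and_traverse_bst data out) := by unfold Spec_create_and_traverse_bst; infer_instance

-- ===== CLAIM (what is proved, stated in full; the proofs are below) =====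
def Claim_equal_create_and_traverse_bst : Prop := ∀ (data : List Int), Dom_create_and_traverse_bst data → Spec_create_and_traverse_bst data (create_and_traverse_bst data)

-- ===== LEMMAS AND PROOFS =====

theorem insertLoop_eq (num : Int) (t : PvTree) : insertLoop num t = insertNode t num := by
  induction t with
  | leaf => rfl
  | node l v r ihl ihr =>
      cases l <;> cases r <;>
        simp_all only [insertLoop, insertNode]

theorem bStep_eq (root : PvTree) (num : Int) : bStep root num = insertNode root num := by
  cases root with
  | leaf => rfl
  | node l v r => simp [bStep, insertLoop_eq]

theorem walkB_eq (t : PvTree) (ino pre post : List Int) :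
    walkB t (ino, pre, post) = (ino ++ inOrderA t, pre ++ preOrderA t, post ++ postOrderA t) := by
  induction t generalizing ino pre post with
  | leaf => simp [walkB, inOrderA, preOrderA, postOrderA]
  | node l v r ihl ihr =>
      simp only [walkB, ihl, ihr, inOrderA, preOrderA, postOrderA]
      simp [List.append_assoc]

-- ===== VERDICT (by name: the statement is the Claim_ definition above) =====
theorem create_and_traverse_bst_spec : Claim_equal_create_and_traverse_bst := by
  intro data _
  have hfold : data.foldl bStep PvTree.leaf
      = data.foldl (fun root num => insertNode root num) PvTree.leaf := by
    simp [funext fun r => funext fun n => bStep_eq r n]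
  have key : ∀ t : PvTree,
      (match walkB t ([], [], []) with
       | (ino, pre, post) => [("inOrder", ino), ("preOrder", pre), ("postOrder", post)])
      = [("inOrder", inOrderA t), ("preOrder", preOrderA t), ("postOrder", postOrderA t)] := by
    intro t; rw [walkB_eq]; simp
  unfold Spec_create_and_traverse_bst create_and_traverse_bst create_and_traverse_bst_alt
  simp only [hfold, key]
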